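-- pv_equiv track=rewrite | github.com/semeneleven/XTest | codes/cyclics/hemming_c.py | can_correct
-- ===== SOURCE A (Python) =====
-- def can_correct(R, max_err):
--     start = 0
--     no_more = False
--     while True:
--
--         i = R.find('1', start)
--
--         if i == -1:
--             break
--         elif no_more:
--             return False
--         else:
--             start = i + 1
--
--         count = 0
--         for j in range(i, len(R)):
--             if R[j] == '0':
--                 if count >= 1:
--                     no_more = True
--                 start = j
--                 break
--
--             count += 1
--
--             if count > max_err:
--                 return False
--     return True
-- ===== SOURCE B (Python) =====
-- def can_correct(R, max_err):
--     i = R.find('1')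
--     if i == -1:
--         return True
--     z = R.find('0', i)
--     if z == -1:
--         return len(R) - i <= max_err
--     if z - i > max_err:
--         return False
--     return R.find('1', z) == -1
-- ===== Notes on version B (the rewrite author's own statement) =====
-- stated objective: simpler
-- what changed: A's nested while/for scan with start/no_more/count state is replaced by three loop-free str.find calls and index arithmetic: locate the first '1', the '0' ending its run, check the run length, and check that no '1' follows.
import Mathlib
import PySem

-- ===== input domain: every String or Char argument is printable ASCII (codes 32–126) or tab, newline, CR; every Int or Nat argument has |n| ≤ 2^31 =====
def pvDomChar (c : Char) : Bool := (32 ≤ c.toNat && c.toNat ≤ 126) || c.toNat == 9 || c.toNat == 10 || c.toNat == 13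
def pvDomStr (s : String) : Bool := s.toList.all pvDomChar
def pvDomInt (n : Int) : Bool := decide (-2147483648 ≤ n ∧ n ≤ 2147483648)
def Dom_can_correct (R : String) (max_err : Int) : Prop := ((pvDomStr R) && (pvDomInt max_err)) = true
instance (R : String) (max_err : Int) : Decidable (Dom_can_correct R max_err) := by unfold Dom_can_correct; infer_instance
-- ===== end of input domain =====

-- B replaces A's nested while/for scanning loops by three loop-free str.find calls and
-- index arithmetic (objective: simpler).

-- ===== PORT A =====
-- inner 'for j in range(i, len(R))' loop of A; state: j, count; start was set to i+1 before
-- the loop (startInit). Result: none = 'return False'; some (start, no_more) = fall through.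
-- (no_more is false whenever this loop runs, so after 'if count >= 1: no_more = True' it is
-- exactly 'decide (count ≥ 1)' on break.)
def canCorrectInner (cs : List Char) (max_err : Int) (startInit : Nat) (j : Nat) (count : Int) :
    Option (Nat × Bool) :=
  if h : j < cs.length then
    if cs[j] = '0' then
      some (j, decide (1 ≤ count))
    else
      let count := count + 1
      if count > max_err then none
      else canCorrectInner cs max_err startInit (j + 1) count
  else some (startInit, false)
termination_by cs.length - j

-- the outer 'while True' loop of A; fuel only makes the recursion total (the Python loop
-- always terminates because start strictly increases; proved in the lemmas below).
def canCorrectLoop (cs : List Char) (max_err : Int) : Nat → Nat → Bool → Bool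
  | 0, _, _ => true
  | fuel + 1, start, no_more =>
    let i := PySem.Chars.findFrom cs ['1'] (start : Int) none
    if i = -1 then true
    else if no_more then false
    else
      match canCorrectInner cs max_err (i.toNat + 1) i.toNat 0 with
      | none => false
      | some (start', no_more') => canCorrectLoop cs max_err fuel start' no_more'

def can_correct (R : String) (max_err : Int) : Bool :=
  canCorrectLoop R.toList max_err (R.toList.length + 1) 0 false

-- ===== PORT B =====
def can_correct_alt (R : String) (max_err : Int) : Bool :=
  let i := PySem.Str.find R "1"
  if i = -1 then true
  else
    let z := PySem.Str.findFrom R "0" i none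
    if z = -1 then decide ((PySem.Str.len R : Int) - i ≤ max_err)
    else if z - i > max_err then false
    else decide (PySem.Str.findFrom R "1" z none = -1)

-- ===== PRECONDITION & SPEC =====
def Spec_can_correct (R : String) (max_err : Int) (out : Bool) : Prop := out = can_correct_alt R max_err
instance (R : String) (max_err : Int) (out : Bool) : Decidable (Spec_can_correct R max_err out) := by unfold Spec_can_correct; infer_instance

-- ===== CLAIM (what is proved, stated in full; the proofs are below) =====
def Claim_equal_can_correct : Prop := ∀ (R : String) (max_err : Int), Dom_can_correct R max_err → Spec_can_correct R max_err (can_correct R max_err)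

-- ===== LEMMAS AND PROOFS =====

theorem singleton_prefix_drop (cs : List Char) (m : Nat) (c : Char) :
    [c] <+: cs.drop m ↔ cs[m]? = some c := by
  rw [← List.head?_drop]
  constructor
  · rintro ⟨t, ht⟩; rw [← ht]; rfl
  · intro h
    rcases hd : cs.drop m with _ | ⟨a, t⟩
    · simp [hd] at h
    · simp [hd] at h; exact ⟨t, by simp [h]⟩

theorem singleton_infix_drop (cs : List Char) (k : Nat) (c : Char) :
    [c] <:+: cs.drop k ↔ ∃ m, k ≤ m ∧ cs[m]? = some c := by
  constructor
  · intro h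
    have hc : c ∈ cs.drop k := h.sublist.subset (List.mem_singleton_self c)
    rw [List.mem_iff_getElem?] at hc
    obtain ⟨j, hj⟩ := hc
    exact ⟨k + j, Nat.le_add_right _ _, by rw [List.getElem?_drop] at hj; exact hj⟩
  · rintro ⟨m, hkm, hm⟩
    obtain ⟨t, ht⟩ := (singleton_prefix_drop cs m c).2 hm
    refine ⟨(cs.drop k).take (m - k), t, ?_⟩
    have hdd : (cs.drop k).drop (m - k) = cs.drop m := by
      rw [List.drop_drop]; congr 1; omega
    calc List.take (m - k) (cs.drop k) ++ [c] ++ t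
        = List.take (m - k) (cs.drop k) ++ ([c] ++ t) := by rw [List.append_assoc]
      _ = List.take (m - k) (cs.drop k) ++ (cs.drop k).drop (m - k) := by rw [ht, hdd]
      _ = cs.drop k := List.take_append_drop _ _

-- inner loop, no '0' at any index ≥ j: falls through (start stays startInit, no_more false)
-- unless the running count would exceed max_err, i.e. unless count + (len - j) > max_err.
theorem inner_no_zero (cs : List Char) (me : Int) (s0 j : Nat) (count : Int)
    (hj : j ≤ cs.length) (hc : count ≤ me)
    (hz : ∀ m, j ≤ m → m < cs.length → cs[m]? ≠ some '0') :
    canCorrectInner cs me s0 j count =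
      if count + ((cs.length - j : Nat) : Int) > me then none else some (s0, false) := by
  induction hn : cs.length - j generalizing j count with
  | zero =>
    have hjl : ¬ j < cs.length := by omega
    rw [canCorrectInner]
    simp only [hjl, dite_false]
    rw [if_neg (by omega)]
  | succ n ih =>
    have hjl : j < cs.length := by omega
    have hne : ¬ cs[j] = '0' := by
      intro h
      exact hz j le_rfl hjl (by simp [List.getElem?_eq_getElem hjl, h])
    rw [canCorrectInner]
    simp only [hjl, dite_true, hne, if_false]
    by_cases hgt : count + 1 > me
    · rw [if_pos hgt, if_pos (show count + ((n + 1 : Nat) : Int) > me by push_cast; omega)]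
    · rw [if_neg hgt, ih (j + 1) (count + 1) (by omega) (by omega)
        (fun m hm hml => hz m (by omega) hml) (by omega)]
      have he : count + 1 + (n : Int) = count + ((n + 1 : Nat) : Int) := by push_cast; ring
      rw [he]

-- inner loop, first '0' at index z ≥ j: breaks there with start = z and no_more = (count ≥ 1
-- at the break), unless the running count exceeds max_err first.
theorem inner_zero (cs : List Char) (me : Int) (s0 j z : Nat) (count : Int)
    (hjz : j ≤ z) (hzl : z < cs.length) (hz0 : cs[z]? = some '0') (hc : count ≤ me)
    (hmin : ∀ m, j ≤ m → m < z → cs[m]? ≠ some '0') :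
    canCorrectInner cs me s0 j count =
      if count + ((z - j : Nat) : Int) > me then none
      else some (z, decide (1 ≤ count + ((z - j : Nat) : Int))) := by
  induction hn : z - j generalizing j count with
  | zero =>
    have hjz' : j = z := by omega
    subst hjz'
    have h0 : cs[j] = '0' := by
      rw [List.getElem?_eq_getElem hzl] at hz0; exact Option.some.inj hz0
    rw [canCorrectInner]
    simp only [hzl, dite_true, h0, if_true]
    rw [if_neg (by omega)]
    simp
  | succ n ih =>
    have hjl : j < cs.length := by omega
    have hne : ¬ cs[j] = '0' := by
      intro h
      exact hmin j le_rfl (by omega) (by simp [List.getElem?_eq_getElem hjl, h])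
    rw [canCorrectInner]
    simp only [hjl, dite_true, hne, if_false]
    by_cases hgt : count + 1 > me
    · rw [if_pos hgt, if_pos (show count + ((n + 1 : Nat) : Int) > me by push_cast; omega)]
    · rw [if_neg hgt, ih (j + 1) (count + 1) (by omega) (by omega)
        (fun m hm hml => hmin m (by omega) hml) (by omega)]
      have he : count + 1 + (n : Int) = count + ((n + 1 : Nat) : Int) := by push_cast; ring
      rw [he]

-- specification of findFrom for the singleton pattern, in index form
theorem findFrom_one_cases (cs : List Char) (c : Char) (k : Nat) (hk : k ≤ cs.length) :
    (PySem.Chars.findFrom cs [c] (k : Int) none = -1 ∧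
      ∀ m, k ≤ m → cs[m]? ≠ some c) ∨
    (∃ p : Nat, PySem.Chars.findFrom cs [c] (k : Int) none = (p : Int) ∧ k ≤ p ∧
      p < cs.length ∧ cs[p]? = some c ∧ ∀ m, k ≤ m → m < p → cs[m]? ≠ some c) := by
  by_cases h : PySem.Chars.findFrom cs [c] (k : Int) none = -1
  · left
    refine ⟨h, fun m hm hmem => ?_⟩
    rw [PySem.Chars.findFrom_natCast_eq_neg_one_iff cs [c] k hk] at h
    exact h ((singleton_infix_drop cs k c).2 ⟨m, hm, hmem⟩)
  · right
    obtain ⟨hkle, hpre, hmin⟩ := PySem.Chars.findFrom_natCast_spec cs [c] k hk h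
    set f := PySem.Chars.findFrom cs [c] (k : Int) none with hf
    have hf0 : 0 ≤ f := le_trans (by exact_mod_cast Nat.zero_le k) hkle
    have hget := (singleton_prefix_drop cs f.toNat c).1 hpre
    have hlen : f.toNat < cs.length := by
      by_contra hge
      rw [List.getElem?_eq_none (by omega)] at hget
      cases hget
    refine ⟨f.toNat, by omega, by omega, hlen, hget, ?_⟩
    intro m hm hml hmem
    exact hmin m hm hml ((singleton_prefix_drop cs m c).2 hmem)

-- outer loop once there is no '0' at or after start and the remaining length fits under
-- max_err: every later iteration falls through and the loop ends with True.
theorem loop_no_zero (cs : List Char) (me : Int) (fuel start : Nat)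
    (hs : start ≤ cs.length) (hfuel : cs.length + 1 - start ≤ fuel)
    (hz : ∀ m, start ≤ m → m < cs.length → cs[m]? ≠ some '0')
    (hme : ((cs.length - start : Nat) : Int) ≤ me) :
    canCorrectLoop cs me fuel start false = true := by
  induction fuel generalizing start with
  | zero => rfl
  | succ n ih =>
    rw [canCorrectLoop]
    rcases findFrom_one_cases cs '1' start hs with ⟨hneg, _⟩ | ⟨p, hp, hkp, hpl, hpc, _⟩
    · simp [hneg]
    · rw [hp]
      have hpne : ¬ ((p : Int) = -1) := by omega
      simp only [hpne, if_false, Bool.false_eq_true, Int.toNat_natCast]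
      rw [inner_no_zero cs me (p + 1) p 0 (le_of_lt hpl)
        (by omega) (fun m hm hml => hz m (le_trans hkp hm) hml)]
      rw [if_neg (show ¬ ((0 : Int) + ((cs.length - p : Nat) : Int) > me) by omega)]
      exact ih (p + 1) hpl (by omega)
        (fun m hm hml => hz m (by omega) hml) (by omega)

-- once no_more is set, one more find decides the loop
theorem loop_no_more (cs : List Char) (me : Int) (fuel start : Nat) (hf : 1 ≤ fuel) :
    canCorrectLoop cs me fuel start true =
      decide (PySem.Chars.findFrom cs ['1'] (start : Int) none = -1) := by
  obtain ⟨k, rfl⟩ : ∃ k, fuel = k + 1 := ⟨fuel - 1, by omega⟩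
  rw [canCorrectLoop]
  by_cases h : PySem.Chars.findFrom cs ['1'] (start : Int) none = -1 <;> simp [h]

-- the two implementations agree (both are total; Dom is not needed)
theorem can_correct_eq (R : String) (me : Int) :
    can_correct R me = can_correct_alt R me := by
  unfold can_correct can_correct_alt
  simp only [PySem.Str.find_eq, PySem.Str.findFrom_eq, PySem.Str.len_eq]
  have h1 : ("1" : String).toList = ['1'] := rfl
  have h0 : ("0" : String).toList = ['0'] := rfl
  simp only [h1, h0]
  rw [canCorrectLoop]
  rcases findFrom_one_cases R.toList '1' 0 (Nat.zero_le _) with ⟨hneg, _⟩ | ⟨p, hp, _, hpl, hpc, hpmin⟩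
  · rw [show ((0 : Nat) : Int) = (0 : Int) from rfl, PySem.Chars.findFrom_zero] at hneg
    simp [hneg]
  · rw [show ((0 : Nat) : Int) = (0 : Int) from rfl, PySem.Chars.findFrom_zero] at hp
    have hpne : ¬ ((p : Int) = -1) := by omega
    simp only [Nat.cast_zero, PySem.Chars.findFrom_zero, hp, hpne, if_false,
      Bool.false_eq_true, Int.toNat_natCast]
    have hp1 : R.toList[p]'hpl = '1' := by
      rw [List.getElem?_eq_getElem hpl] at hpc; exact Option.some.inj hpc
    have hne0 : ¬ (R.toList[p]'hpl = '0') := by rw [hp1]; decide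
    rcases findFrom_one_cases R.toList '0' p (le_of_lt hpl) with ⟨hzneg, hznone⟩ |
      ⟨z, hzf, hzp, hzl, hzc, hzmin⟩
    · -- no '0' at or after p
      simp only [hzneg]
      rw [if_pos trivial]
      by_cases hme : ((R.toList.length : Int) - (p : Int) ≤ me)
      · rw [inner_no_zero R.toList me (p + 1) p 0 (le_of_lt hpl) (by omega)
          (fun m hm _ => hznone m hm)]
        rw [if_neg (show ¬ ((0 : Int) + ((R.toList.length - p : Nat) : Int) > me) by omega)]
        rw [show (match (some (p + 1, false) : Option (Nat × Bool)) with
              | none => false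
              | some (start', no_more') =>
                  canCorrectLoop R.toList me R.toList.length start' no_more') =
            canCorrectLoop R.toList me R.toList.length (p + 1) false from rfl]
        rw [loop_no_zero R.toList me _ (p + 1) hpl (by omega)
          (fun m hm hml => hznone m (by omega)) (by omega)]
        exact (decide_eq_true hme).symm
      · by_cases hme0 : (0 : Int) ≤ me
        · rw [inner_no_zero R.toList me (p + 1) p 0 (le_of_lt hpl) hme0
            (fun m hm _ => hznone m hm)]
          rw [if_pos (by omega)]
          exact (decide_eq_false hme).symm
        · -- max_err < 0: the first step of the inner loop already exceeds it
          rw [canCorrectInner, dif_pos hpl, if_neg hne0]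
          rw [if_pos (show (0 : Int) + 1 > me by omega)]
          exact (decide_eq_false hme).symm
    · -- first '0' at or after p sits at z; z > p since R[p] = '1'
      have hzgt : p < z := by
        rcases Nat.lt_or_ge p z with h | h
        · exact h
        · exfalso
          have hpz : p = z := by omega
          rw [hpz, hzc] at hpc
          exact absurd (Option.some.inj hpc) (by decide)
      have hzne : ¬ ((z : Int) = -1) := by omega
      simp only [hzf, hzne, if_false]
      by_cases hme : (z : Int) - (p : Int) > me
      · rw [if_pos hme]
        by_cases hme0 : (0 : Int) ≤ me
        · rw [inner_zero R.toList me (p + 1) p z 0 (le_of_lt hzgt) hzl hzc hme0 hzmin]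
          rw [if_pos (by omega)]
        · rw [canCorrectInner, dif_pos hpl, if_neg hne0]
          rw [if_pos (show (0 : Int) + 1 > me by omega)]
      · have hme0 : (0 : Int) ≤ me := by omega
        rw [if_neg hme]
        rw [inner_zero R.toList me (p + 1) p z 0 (le_of_lt hzgt) hzl hzc hme0 hzmin]
        rw [if_neg (by omega)]
        rw [show decide (1 ≤ (0 : Int) + ((z - p : Nat) : Int)) = true from
          decide_eq_true (by omega)]
        rw [show (match (some (z, true) : Option (Nat × Bool)) with
              | none => false
              | some (start', no_more') =>
                  canCorrectLoop R.toList me R.toList.length start' no_more') =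
            canCorrectLoop R.toList me R.toList.length z true from rfl]
        exact loop_no_more R.toList me _ z (by omega)

-- ===== VERDICT (by name: the statement is the Claim_ definition above) =====
theorem can_correct_spec : Claim_equal_can_correct := by
  intro R me _
  exact can_correct_eq R me
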